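-- pv_equiv track=rewrite | github.com/BradHawthorne/apple_ii_genetic_drift_disassembly | extract_sprites.py | render_hgr_row
-- ===== SOURCE A (Python) =====
-- COLORS = {
--     'black':  (0, 0, 0),
--     'purple': (255, 68, 253),
--     'green':  (20, 245, 60),
--     'blue':   (20, 207, 253),
--     'orange': (255, 106, 60),
--     'white':  (255, 255, 255),
-- }
--
-- def render_hgr_row(row_bytes):
--     """
--     Render one row of HGR sprite data to a list of (r,g,b) pixel tuples.
--
--     Each byte encodes 7 pixels (bits 0-6).  Bit 7 selects the color palette.
--     The pixel column index is absolute across the row (byte_index * 7 + bit).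
--
--     Adjacency rules:
--       - A bit that is 0 -> black.
--       - A bit that is 1 with an adjacent 1 (left or right, including across
--         byte boundaries within the row) -> white.
--       - A bit that is 1 and isolated -> color determined by palette and
--         whether the absolute column is even or odd.
--     """
--     # First, decode every bit into a flat list and record per-pixel palette
--     num_bytes = len(row_bytes)
--     num_pixels = num_bytes * 7
--     bits = [0] * num_pixels
--     palettes = [0] * num_pixels
--
--     for byte_idx in range(num_bytes):
--         byte_val = row_bytes[byte_idx]
--         palette = (byte_val >> 7) & 1
--         for bit in range(7):
--             col = byte_idx * 7 + bit
--             bits[col] = (byte_val >> bit) & 1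
--             palettes[col] = palette
--
--     # Now determine colors with adjacency logic
--     pixels = []
--     for col in range(num_pixels):
--         if bits[col] == 0:
--             pixels.append(COLORS['black'])
--             continue
--
--         # Check adjacency (left and right neighbors)
--         left_set = (col > 0 and bits[col - 1] == 1)
--         right_set = (col < num_pixels - 1 and bits[col + 1] == 1)
--
--         if left_set or right_set:
--             pixels.append(COLORS['white'])
--         else:
--             # Isolated bit: color depends on palette and column parity
--             pal = palettes[col]
--             if pal == 0:
--                 # Palette 0: even column = purple, odd column = green
--                 pixels.append(COLORS['purple'] if col % 2 == 0 else COLORS['green'])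
--             else:
--                 # Palette 1: even column = blue, odd column = orange
--                 pixels.append(COLORS['blue'] if col % 2 == 0 else COLORS['orange'])
--
--     return pixels
-- ===== SOURCE B (Python) =====
-- def render_hgr_row(row_bytes):
--     BLACK = (0, 0, 0)
--     WHITE = (255, 255, 255)
--     PALETTE = (((255, 68, 253), (20, 245, 60)),
--                ((20, 207, 253), (255, 106, 60)))
--
--     def classify(bit, pal, parity, left, right):
--         if bit == 0:
--             return BLACK
--         if left or right:
--             return WHITE
--         return PALETTE[pal][parity]
--
--     pixels = []
--     prev = None  # (bit, palette, parity, had_left_neighbor)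
--     for byte_idx, byte_val in enumerate(row_bytes):
--         pal = (byte_val >> 7) & 1
--         for i in range(7):
--             bit = (byte_val >> i) & 1
--             parity = (byte_idx * 7 + i) % 2
--             if prev is not None:
--                 pb, pp, ppar, pleft = prev
--                 pixels.append(classify(pb, pp, ppar, pleft, bit == 1))
--             pleft_new = prev is not None and prev[0] == 1
--             prev = (bit, pal, parity, pleft_new)
--     if prev is not None:
--         pb, pp, ppar, pleft = prev
--         pixels.append(classify(pb, pp, ppar, pleft, False))
--     return pixels
-- ===== Notes on version B (the rewrite author's own statement) =====
-- stated objective: alternative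
-- what changed: Replaced A's two-phase design (materialize full bits[] and palettes[] arrays, then a second indexed pass with random-access neighbor lookups) by a single streaming pass over the bytes/bits that keeps only O(1) state (the previous pixel's bit, palette, parity and left-neighbor flag), finalizing each pixel when its right neighbor is read and flushing the last one after the loop.
import Mathlib
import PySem

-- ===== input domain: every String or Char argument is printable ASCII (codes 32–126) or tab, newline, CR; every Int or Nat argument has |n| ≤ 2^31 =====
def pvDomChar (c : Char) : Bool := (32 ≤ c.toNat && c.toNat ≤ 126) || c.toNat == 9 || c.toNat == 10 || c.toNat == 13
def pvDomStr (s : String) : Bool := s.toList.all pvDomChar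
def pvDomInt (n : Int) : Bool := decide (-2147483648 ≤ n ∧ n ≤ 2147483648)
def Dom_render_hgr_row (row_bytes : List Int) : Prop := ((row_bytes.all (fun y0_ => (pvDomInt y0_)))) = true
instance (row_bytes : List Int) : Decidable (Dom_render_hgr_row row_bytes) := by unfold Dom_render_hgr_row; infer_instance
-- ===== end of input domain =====

-- B replaces A's two array-building passes by one streaming pass with O(1) state; return value proved identical.

-- ===== PORT A =====
-- helper: the body of A's first loop (decode one byte into bits[]/palettes[] by index assignment)
def fillStep (row_bytes : List Int) (st : List Int × List Int) (byte_idx : Int) : List Int × List Int :=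
  let byte_val := (PySem.List.pyGet? row_bytes byte_idx).getD 0
  let palette := Int.land (byte_val >>> (7 : Int)) 1
  (PySem.List.pyRange 0 7 1).foldl (fun st bit =>
    let col := byte_idx * 7 + bit
    (PySem.List.pySetD st.1 col (Int.land (byte_val >>> bit) 1),
     PySem.List.pySetD st.2 col palette)) st

-- helper: the body of A's second loop (one pixel from the decoded arrays; Python's short-circuit
-- 'col > 0 and bits[col-1] == 1' is exact here because '&&' never yields true when the guard is false)
def renderA_pixel (bits palettes : List Int) (num_pixels col : Int) : Int × Int × Int :=
  if (PySem.List.pyGet? bits col).getD 0 = 0 then (0, 0, 0)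
  else
    let left_set := decide (col > 0) && (((PySem.List.pyGet? bits (col - 1)).getD 0) == 1)
    let right_set := decide (col < num_pixels - 1) && (((PySem.List.pyGet? bits (col + 1)).getD 0) == 1)
    if left_set || right_set then (255, 255, 255)
    else
      let pal := (PySem.List.pyGet? palettes col).getD 0
      if pal = 0 then (if col % 2 = 0 then (255, 68, 253) else (20, 245, 60))
      else (if col % 2 = 0 then (20, 207, 253) else (255, 106, 60))

def render_hgr_row (row_bytes : List Int) : List (Int × Int × Int) :=
  let num_bytes : Int := (row_bytes.length : Int)
  let num_pixels : Int := num_bytes * 7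
  let zeros : List Int := List.replicate num_pixels.toNat 0      -- [0] * num_pixels
  let filled := (PySem.List.pyRange 0 num_bytes 1).foldl (fillStep row_bytes) (zeros, zeros)
  (PySem.List.pyRange 0 num_pixels 1).foldl
    (fun pixels col => pixels ++ [renderA_pixel filled.1 filled.2 num_pixels col]) []

-- ===== PORT B =====
-- helper: Source B's classify(bit, pal, parity, left, right); PALETTE[pal][parity] with pal, parity ∈ {0,1}
def altClassify (bit pal parity : Int) (left right : Bool) : Int × Int × Int :=
  if bit = 0 then (0, 0, 0)
  else if left || right then (255, 255, 255)
  else if pal = 0 then (if parity = 0 then (255, 68, 253) else (20, 245, 60))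
  else (if parity = 0 then (20, 207, 253) else (255, 106, 60))

-- helper: one iteration of Source B's inner loop body on the O(1) state (pixels, prev)
def altStep (st : List (Int × Int × Int) × Option (Int × Int × Int × Bool))
    (cell : Int × Int × Int) : List (Int × Int × Int) × Option (Int × Int × Int × Bool) :=
  match st.2 with
  | none => (st.1, some (cell.1, cell.2.1, cell.2.2, false))
  | some (pb, pp, ppar, pleft) =>
      (st.1 ++ [altClassify pb pp ppar pleft (cell.1 == 1)],
       some (cell.1, cell.2.1, cell.2.2, pb == 1))

def render_hgr_row_alt (row_bytes : List Int) : List (Int × Int × Int) :=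
  let st := (PySem.List.enumerate row_bytes).foldl (fun st p =>
      let byte_idx : Int := p.1
      let byte_val : Int := p.2
      let pal := Int.land (byte_val >>> (7 : Int)) 1
      (PySem.List.pyRange 0 7 1).foldl (fun st i =>
          let bit := Int.land (byte_val >>> i) 1
          let parity := (byte_idx * 7 + i) % 2
          altStep st (bit, pal, parity)) st)
    ([], none)
  match st.2 with
  | none => st.1
  | some (pb, pp, ppar, pleft) => st.1 ++ [altClassify pb pp ppar pleft false]

-- ===== PRECONDITION & SPEC =====
def Spec_render_hgr_row (row_bytes : List Int) (out : List (Int × Int × Int)) : Prop := out = render_hgr_row_alt row_bytes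
instance (row_bytes : List Int) (out : List (Int × Int × Int)) : Decidable (Spec_render_hgr_row row_bytes out) := by unfold Spec_render_hgr_row; infer_instance

-- ===== CLAIM (what is proved, stated in full; the proofs are below) =====
def Claim_equal_render_hgr_row : Prop := ∀ (row_bytes : List Int), Dom_render_hgr_row row_bytes → Spec_render_hgr_row row_bytes (render_hgr_row row_bytes)

-- ===== LEMMAS AND PROOFS =====

-- the flat sequence of (bit, palette, parity) cells a row denotes
def cellOfBit (byte_idx b i : Int) : Int × Int × Int :=
  (Int.land (b >>> i) 1, Int.land (b >>> (7 : Int)) 1, (byte_idx * 7 + i) % 2)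

def cellsOfByte (p : Int × Int) : List (Int × Int × Int) :=
  (PySem.List.pyRange 0 7 1).map (cellOfBit p.1 p.2)

def cellsFrom (s : Int) (rb : List Int) : List (Int × Int × Int) :=
  (PySem.List.enumerate rb s).flatMap cellsOfByte

def byteBits (b : Int) : List Int :=
  (PySem.List.pyRange 0 7 1).map (fun i => Int.land (b >>> i) 1)

def bytePals (b : Int) : List Int :=
  (PySem.List.pyRange 0 7 1).map (fun _ => Int.land (b >>> (7 : Int)) 1)

def bitsOf (l : List Int) : List Int := l.flatMap byteBits
def palsOf (l : List Int) : List Int := l.flatMap bytePals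

def altFlush (st : List (Int × Int × Int) × Option (Int × Int × Int × Bool)) : List (Int × Int × Int) :=
  match st.2 with
  | none => st.1
  | some (pb, pp, ppar, pleft) => st.1 ++ [altClassify pb pp ppar pleft false]

def bAt (C : List (Int × Int × Int)) (k : Nat) : Int := (C.getD k (0, 0, 0)).1
def pAt (C : List (Int × Int × Int)) (k : Nat) : Int := (C.getD k (0, 0, 0)).2.1

def prevOf (C : List (Int × Int × Int)) (k : Nat) : Option (Int × Int × Int × Bool) :=
  some (bAt C (k - 1), pAt C (k - 1), ((k : Int) - 1) % 2, decide (2 ≤ k) && (bAt C (k - 2) == 1))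

def pixA (C : List (Int × Int × Int)) (col : Int) : Int × Int × Int :=
  renderA_pixel (C.map (·.1)) (C.map (·.2.1)) (C.length : Int) col

lemma pyRange7 : PySem.List.pyRange 0 7 1 = [0, 1, 2, 3, 4, 5, 6] := by decide

lemma cellsFrom_cons (s : Int) (b : Int) (rb : List Int) :
    cellsFrom s (b :: rb) = cellsOfByte (s, b) ++ cellsFrom (s + 1) rb := by
  simp [cellsFrom, PySem.List.enumerate_cons]

lemma cells_length (rb : List Int) (s : Int) : (cellsFrom s rb).length = 7 * rb.length := by
  induction rb generalizing s with
  | nil => simp [cellsFrom]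
  | cons b rb ih =>
      rw [cellsFrom_cons]
      simp [cellsOfByte, pyRange7, ih, List.length_cons]
      ring

lemma cells_fst (rb : List Int) (s : Int) : (cellsFrom s rb).map (·.1) = bitsOf rb := by
  induction rb generalizing s with
  | nil => simp [cellsFrom, bitsOf]
  | cons b rb ih =>
      rw [cellsFrom_cons]
      simp [ih, bitsOf, cellsOfByte, byteBits, pyRange7, cellOfBit]

lemma cells_pal (rb : List Int) (s : Int) : (cellsFrom s rb).map (·.2.1) = palsOf rb := by
  induction rb generalizing s with
  | nil => simp [cellsFrom, palsOf]
  | cons b rb ih =>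
      rw [cellsFrom_cons]
      simp [ih, palsOf, cellsOfByte, bytePals, pyRange7, cellOfBit]

lemma cells_parity (rb : List Int) (s : Int) (k : Nat) (hs : 0 ≤ s) (hk : k < 7 * rb.length) :
    ((cellsFrom s rb).getD k (0, 0, 0)).2.2 = (7 * s + (k : Int)) % 2 := by
  induction rb generalizing s k with
  | nil => simp at hk
  | cons b rb ih =>
      rw [cellsFrom_cons]
      by_cases h7 : k < 7
      · have hlen7 : (cellsOfByte (s, b)).length = 7 := by simp [cellsOfByte, pyRange7]
        rw [List.getD_append _ _ _ _ (by omega)]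
        interval_cases k <;>
          simp [cellsOfByte, pyRange7, cellOfBit] <;> omega
      · have hlen : (cellsOfByte (s, b)).length = 7 := by simp [cellsOfByte, pyRange7]
        rw [List.getD_append_right _ _ _ _ (by omega)]
        rw [hlen]
        have := ih (s + 1) (k - 7) (by omega) (by simp at hk ⊢; omega)
        rw [this]
        have hcast : ((k - 7 : Nat) : Int) = (k : Int) - 7 := by omega
        rw [hcast]
        omega

lemma setMid (p B z : List Int) (v k i : Int) (hk : (p.length : Int) = k) (h0 : 0 ≤ i)
    (hi : i < (B.length : Int)) :
    PySem.List.pySetD (p ++ (B ++ z)) (k + i) v = p ++ (B.set i.toNat v ++ z) := by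
  have hidx : PySem.List.pyIdx? (p ++ (B ++ z)).length (k + i) = some (p.length + i.toNat) := by
    simp only [PySem.List.pyIdx?, List.length_append]
    rw [if_pos (by omega), if_pos (by push_cast; omega)]
    congr 1
    omega
  simp only [PySem.List.pySetD, PySem.List.pySet?, hidx, Option.map_some, Option.getD_some]
  rw [List.set_append_right _ _ (by omega), Nat.add_sub_cancel_left,
      List.set_append_left _ _ (by omega)]

lemma inner_fill (f g : Int → Int) (p1 p2 z1 z2 : List Int) (j : Int)
    (h1 : (p1.length : Int) = j * 7) (h2 : (p2.length : Int) = j * 7) :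
    (PySem.List.pyRange 0 7 1).foldl (fun st bit =>
        (PySem.List.pySetD st.1 (j * 7 + bit) (f bit), PySem.List.pySetD st.2 (j * 7 + bit) (g bit)))
      (p1 ++ (List.replicate 7 0 ++ z1), p2 ++ (List.replicate 7 0 ++ z2))
    = (p1 ++ ([f 0, f 1, f 2, f 3, f 4, f 5, f 6] ++ z1),
       p2 ++ ([g 0, g 1, g 2, g 3, g 4, g 5, g 6] ++ z2)) := by
  have e : List.replicate 7 (0 : Int) = [0, 0, 0, 0, 0, 0, 0] := rfl
  rw [pyRange7, e]
  simp only [List.foldl_cons, List.foldl_nil]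
  rw [setMid p1 ([0, 0, 0, 0, 0, 0, 0] : List Int) z1 (f 0) (j * 7) 0 h1 (by norm_num) (by norm_num),
      setMid p2 ([0, 0, 0, 0, 0, 0, 0] : List Int) z2 (g 0) (j * 7) 0 h2 (by norm_num) (by norm_num),
      show List.set ([0, 0, 0, 0, 0, 0, 0] : List Int) (Int.toNat 0) (f 0) = [f 0, 0, 0, 0, 0, 0, 0] from rfl,
      show List.set ([0, 0, 0, 0, 0, 0, 0] : List Int) (Int.toNat 0) (g 0) = [g 0, 0, 0, 0, 0, 0, 0] from rfl]
  rw [setMid p1 ([f 0, 0, 0, 0, 0, 0, 0] : List Int) z1 (f 1) (j * 7) 1 h1 (by norm_num) (by norm_num),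
      setMid p2 ([g 0, 0, 0, 0, 0, 0, 0] : List Int) z2 (g 1) (j * 7) 1 h2 (by norm_num) (by norm_num),
      show List.set ([f 0, 0, 0, 0, 0, 0, 0] : List Int) (Int.toNat 1) (f 1) = [f 0, f 1, 0, 0, 0, 0, 0] from rfl,
      show List.set ([g 0, 0, 0, 0, 0, 0, 0] : List Int) (Int.toNat 1) (g 1) = [g 0, g 1, 0, 0, 0, 0, 0] from rfl]
  rw [setMid p1 ([f 0, f 1, 0, 0, 0, 0, 0] : List Int) z1 (f 2) (j * 7) 2 h1 (by norm_num) (by norm_num),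
      setMid p2 ([g 0, g 1, 0, 0, 0, 0, 0] : List Int) z2 (g 2) (j * 7) 2 h2 (by norm_num) (by norm_num),
      show List.set ([f 0, f 1, 0, 0, 0, 0, 0] : List Int) (Int.toNat 2) (f 2) = [f 0, f 1, f 2, 0, 0, 0, 0] from rfl,
      show List.set ([g 0, g 1, 0, 0, 0, 0, 0] : List Int) (Int.toNat 2) (g 2) = [g 0, g 1, g 2, 0, 0, 0, 0] from rfl]
  rw [setMid p1 ([f 0, f 1, f 2, 0, 0, 0, 0] : List Int) z1 (f 3) (j * 7) 3 h1 (by norm_num) (by norm_num),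
      setMid p2 ([g 0, g 1, g 2, 0, 0, 0, 0] : List Int) z2 (g 3) (j * 7) 3 h2 (by norm_num) (by norm_num),
      show List.set ([f 0, f 1, f 2, 0, 0, 0, 0] : List Int) (Int.toNat 3) (f 3) = [f 0, f 1, f 2, f 3, 0, 0, 0] from rfl,
      show List.set ([g 0, g 1, g 2, 0, 0, 0, 0] : List Int) (Int.toNat 3) (g 3) = [g 0, g 1, g 2, g 3, 0, 0, 0] from rfl]
  rw [setMid p1 ([f 0, f 1, f 2, f 3, 0, 0, 0] : List Int) z1 (f 4) (j * 7) 4 h1 (by norm_num) (by norm_num),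
      setMid p2 ([g 0, g 1, g 2, g 3, 0, 0, 0] : List Int) z2 (g 4) (j * 7) 4 h2 (by norm_num) (by norm_num),
      show List.set ([f 0, f 1, f 2, f 3, 0, 0, 0] : List Int) (Int.toNat 4) (f 4) = [f 0, f 1, f 2, f 3, f 4, 0, 0] from rfl,
      show List.set ([g 0, g 1, g 2, g 3, 0, 0, 0] : List Int) (Int.toNat 4) (g 4) = [g 0, g 1, g 2, g 3, g 4, 0, 0] from rfl]
  rw [setMid p1 ([f 0, f 1, f 2, f 3, f 4, 0, 0] : List Int) z1 (f 5) (j * 7) 5 h1 (by norm_num) (by norm_num),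
      setMid p2 ([g 0, g 1, g 2, g 3, g 4, 0, 0] : List Int) z2 (g 5) (j * 7) 5 h2 (by norm_num) (by norm_num),
      show List.set ([f 0, f 1, f 2, f 3, f 4, 0, 0] : List Int) (Int.toNat 5) (f 5) = [f 0, f 1, f 2, f 3, f 4, f 5, 0] from rfl,
      show List.set ([g 0, g 1, g 2, g 3, g 4, 0, 0] : List Int) (Int.toNat 5) (g 5) = [g 0, g 1, g 2, g 3, g 4, g 5, 0] from rfl]
  rw [setMid p1 ([f 0, f 1, f 2, f 3, f 4, f 5, 0] : List Int) z1 (f 6) (j * 7) 6 h1 (by norm_num) (by norm_num),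
      setMid p2 ([g 0, g 1, g 2, g 3, g 4, g 5, 0] : List Int) z2 (g 6) (j * 7) 6 h2 (by norm_num) (by norm_num),
      show List.set ([f 0, f 1, f 2, f 3, f 4, f 5, 0] : List Int) (Int.toNat 6) (f 6) = [f 0, f 1, f 2, f 3, f 4, f 5, f 6] from rfl,
      show List.set ([g 0, g 1, g 2, g 3, g 4, g 5, 0] : List Int) (Int.toNat 6) (g 6) = [g 0, g 1, g 2, g 3, g 4, g 5, g 6] from rfl]


lemma fill_spec : ∀ (rest rb : List Int) (j : Nat), rb.drop j = rest →
    ∀ (p1 p2 : List Int), p1.length = 7 * j → p2.length = 7 * j →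
    (PySem.List.pyRange (j : Int) (rb.length : Int) 1).foldl (fillStep rb)
      (p1 ++ List.replicate (7 * rest.length) 0, p2 ++ List.replicate (7 * rest.length) 0)
    = (p1 ++ bitsOf rest, p2 ++ palsOf rest) := by
  intro rest
  induction rest with
  | nil =>
      intro rb j hdrop p1 p2 h1 h2
      have hle : rb.length ≤ j := List.drop_eq_nil_iff.mp hdrop
      rw [PySem.List.pyRange_one_eq_nil (by exact_mod_cast hle)]
      simp [bitsOf, palsOf]
  | cons b rest ih =>
      intro rb j hdrop p1 p2 h1 h2
      have hj : j < rb.length := by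
        by_contra h
        rw [List.drop_eq_nil_iff.mpr (by omega)] at hdrop
        cases hdrop
      have hget : rb[j]? = some b := by
        have h0 : (rb.drop j)[0]? = some b := by rw [hdrop]; rfl
        rwa [List.getElem?_drop, Nat.add_zero] at h0
      have hdrop' : rb.drop (j + 1) = rest := by
        rw [← List.drop_drop (i := 1) (j := j), hdrop]
        rfl
      have hbyte : (PySem.List.pyGet? rb ((j : Nat) : Int)).getD 0 = b := by
        rw [PySem.List.pyGet?_natCast, hget]
        rfl
      have hrepl : List.replicate (7 * (b :: rest).length) (0 : Int)
          = List.replicate 7 0 ++ List.replicate (7 * rest.length) 0 := by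
        rw [← List.replicate_add]
        congr 1
        simp
        ring
      rw [PySem.List.pyRange_one_cons (by exact_mod_cast hj), List.foldl_cons, hrepl]
      have hbb : byteBits b = [Int.land (b >>> (0:Int)) 1, Int.land (b >>> (1:Int)) 1,
          Int.land (b >>> (2:Int)) 1, Int.land (b >>> (3:Int)) 1, Int.land (b >>> (4:Int)) 1,
          Int.land (b >>> (5:Int)) 1, Int.land (b >>> (6:Int)) 1] := by
        simp [byteBits, pyRange7]
      have hbp : bytePals b = [Int.land (b >>> (7:Int)) 1, Int.land (b >>> (7:Int)) 1,
          Int.land (b >>> (7:Int)) 1, Int.land (b >>> (7:Int)) 1, Int.land (b >>> (7:Int)) 1,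
          Int.land (b >>> (7:Int)) 1, Int.land (b >>> (7:Int)) 1] := by
        simp [bytePals, pyRange7]
      have hinner := inner_fill (fun bit => Int.land (b >>> bit) 1)
        (fun _ => Int.land (b >>> (7 : Int)) 1) p1 p2
        (List.replicate (7 * rest.length) 0) (List.replicate (7 * rest.length) 0)
        ((j : Nat) : Int) (by push_cast [h1]; ring) (by push_cast [h2]; ring)
      have hstep : fillStep rb
          (p1 ++ (List.replicate 7 0 ++ List.replicate (7 * rest.length) 0),
           p2 ++ (List.replicate 7 0 ++ List.replicate (7 * rest.length) 0)) ((j : Nat) : Int)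
          = (p1 ++ (byteBits b ++ List.replicate (7 * rest.length) 0),
             p2 ++ (bytePals b ++ List.replicate (7 * rest.length) 0)) := by
        simp only [fillStep, hbyte]
        rw [hbb, hbp]
        exact hinner
      rw [hstep]
      have h1' : (p1 ++ (byteBits b)).length = 7 * (j + 1) := by
        simp [hbb, h1]
        ring
      have h2' : (p2 ++ (bytePals b)).length = 7 * (j + 1) := by
        simp [hbp, h2]
        ring
      have := ih rb (j + 1) hdrop' (p1 ++ byteBits b) (p2 ++ bytePals b) h1' h2'
      push_cast at this
      rw [← List.append_assoc, ← List.append_assoc, this]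
      simp [bitsOf, palsOf]


lemma lookup_fst (C : List (Int × Int × Int)) (m : Nat) (hm : m < C.length) :
    (PySem.List.pyGet? (C.map (·.1)) ((m : Nat) : Int)).getD 0 = bAt C m := by
  rw [PySem.List.pyGet?_natCast]
  simp [bAt, List.getD_eq_getElem?_getD, List.getElem?_eq_getElem hm]

lemma lookup_pal (C : List (Int × Int × Int)) (m : Nat) (hm : m < C.length) :
    (PySem.List.pyGet? (C.map (·.2.1)) ((m : Nat) : Int)).getD 0 = pAt C m := by
  rw [PySem.List.pyGet?_natCast]
  simp [pAt, List.getD_eq_getElem?_getD, List.getElem?_eq_getElem hm]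

lemma pix_agree (C : List (Int × Int × Int)) (k : Nat) (h1 : 1 ≤ k) (hk : k ≤ C.length)
    (right : Bool)
    (hr : right = (decide ((k : Int) - 1 < (C.length : Int) - 1) &&
      (((PySem.List.pyGet? (C.map (·.1)) ((k : Int) - 1 + 1)).getD 0) == 1))) :
    altClassify (bAt C (k - 1)) (pAt C (k - 1)) (((k : Int) - 1) % 2)
      (decide (2 ≤ k) && (bAt C (k - 2) == 1)) right
    = pixA C ((k : Int) - 1) := by
  have hcol : ((k : Int) - 1) = ((k - 1 : Nat) : Int) := by omega
  have hbits : (PySem.List.pyGet? (C.map (·.1)) ((k : Int) - 1)).getD 0 = bAt C (k - 1) := by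
    rw [hcol, lookup_fst C (k - 1) (by omega)]
  have hpal : (PySem.List.pyGet? (C.map (·.2.1)) ((k : Int) - 1)).getD 0 = pAt C (k - 1) := by
    rw [hcol, lookup_pal C (k - 1) (by omega)]
  have hleft : (decide ((k : Int) - 1 > 0) &&
      (((PySem.List.pyGet? (C.map (·.1)) ((k : Int) - 1 - 1)).getD 0) == 1))
      = (decide (2 ≤ k) && (bAt C (k - 2) == 1)) := by
    by_cases h2 : 2 ≤ k
    · have e1 : ((k : Int) - 1 - 1) = ((k - 2 : Nat) : Int) := by omega
      rw [e1, lookup_fst C (k - 2) (by omega)]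
      have : decide ((k : Int) - 1 > 0) = decide (2 ≤ k) := by
        simp only [decide_eq_decide]
        omega
      rw [this]
    · have hk1 : k = 1 := by omega
      subst hk1
      norm_num
  simp only [pixA, renderA_pixel, hbits, hpal, hleft, hr, altClassify]

lemma stream_spec : ∀ (rest : List (Int × Int × Int)) (C : List (Int × Int × Int)) (k : Nat)
    (acc : List (Int × Int × Int)), C.drop k = rest → 1 ≤ k → k ≤ C.length →
    (∀ j : Nat, j < C.length → (C.getD j (0, 0, 0)).2.2 = (j : Int) % 2) →
    altFlush (rest.foldl altStep (acc, prevOf C k))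
    = acc ++ (PySem.List.pyRange ((k : Int) - 1) (C.length : Int) 1).map (pixA C) := by
  intro rest
  induction rest with
  | nil =>
      intro C k acc hdrop h1 hk hpar
      have hkl : C.length ≤ k := List.drop_eq_nil_iff.mp hdrop
      have hke : k = C.length := by omega
      subst hke
      have hrange : PySem.List.pyRange ((C.length : Int) - 1) (C.length : Int) 1
          = [(C.length : Int) - 1] := by
        have := PySem.List.pyRange_one_cons (a := (C.length : Int) - 1) (b := (C.length : Int))
          (by omega)
        rw [this, PySem.List.pyRange_one_eq_nil (by omega)]
      rw [List.foldl_nil, hrange]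
      simp only [altFlush, prevOf, List.map_cons, List.map_nil]
      rw [pix_agree C C.length h1 (le_refl _) false
        (by rw [decide_eq_false (by omega : ¬ ((C.length : Int) - 1 < (C.length : Int) - 1))]
            simp)]
  | cons c rest ih =>
      intro C k acc hdrop h1 hk hpar
      have hklt : k < C.length := by
        by_contra h
        rw [List.drop_eq_nil_iff.mpr (by omega)] at hdrop
        cases hdrop
      have hget : C[k]? = some c := by
        have h0 : (C.drop k)[0]? = some c := by rw [hdrop]; rfl
        rwa [List.getElem?_drop, Nat.add_zero] at h0
      have hgetE : C[k]'hklt = c := by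
        have := List.getElem?_eq_getElem hklt
        rw [hget] at this
        exact (Option.some.inj this).symm
      have hdrop' : C.drop (k + 1) = rest := by
        rw [← List.drop_drop (i := 1) (j := k), hdrop]
        rfl
      rw [List.foldl_cons]
      have hstep : altStep (acc, prevOf C k) c
          = (acc ++ [pixA C ((k : Int) - 1)], prevOf C (k + 1)) := by
        simp only [altStep, prevOf]
        congr 1
        · congr 1
          rw [pix_agree C k h1 (by omega) (c.1 == 1)
            (by
              have e1 : ((k : Int) - 1 + 1) = ((k : Nat) : Int) := by omega
              rw [e1, lookup_fst C k hklt]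
              rw [decide_eq_true (by omega : ((k : Int) - 1 < (C.length : Int) - 1))]
              simp [bAt, List.getD_eq_getElem?_getD, List.getElem?_eq_getElem hklt, hgetE])]
        · have hb : bAt C k = c.1 := by
            simp [bAt, List.getD_eq_getElem?_getD, List.getElem?_eq_getElem hklt, hgetE]
          have hp : pAt C k = c.2.1 := by
            simp [pAt, List.getD_eq_getElem?_getD, List.getElem?_eq_getElem hklt, hgetE]
          have hparc : c.2.2 = (((k + 1 : Nat) : Int) - 1) % 2 := by
            have := hpar k hklt
            rw [List.getD_eq_getElem?_getD, List.getElem?_eq_getElem hklt, hgetE] at this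
            simp only [Option.getD_some] at this
            rw [this]
            congr 1
            push_cast
            ring
          have e1 : k + 1 - 1 = k := by omega
          have e2k : k + 1 - 2 = k - 1 := by omega
          rw [e1, e2k, hb, hp, decide_eq_true (by omega : 2 ≤ k + 1), Bool.true_and, ← hparc]
      rw [hstep]
      have := ih C (k + 1) (acc ++ [pixA C ((k : Int) - 1)]) hdrop' (by omega) (by omega) hpar
      rw [this]
      have e2 : ((k + 1 : Nat) : Int) - 1 = (k : Int) - 1 + 1 := by push_cast; ring
      rw [e2]
      conv_rhs => rw [PySem.List.pyRange_one_cons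
        (show ((k : Int) - 1) < (C.length : Int) by push_cast; omega)]
      simp


lemma alt_eq_cells (rb : List Int) :
    render_hgr_row_alt rb = altFlush ((cellsFrom 0 rb).foldl altStep ([], none)) := by
  have hfold : (cellsFrom 0 rb).foldl altStep
        (([], none) : List (Int × Int × Int) × Option (Int × Int × Int × Bool))
      = (PySem.List.enumerate rb).foldl (fun st p =>
          let byte_idx : Int := p.1
          let byte_val : Int := p.2
          let pal := Int.land (byte_val >>> (7 : Int)) 1
          (PySem.List.pyRange 0 7 1).foldl (fun st i =>
              let bit := Int.land (byte_val >>> i) 1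
              let parity := (byte_idx * 7 + i) % 2
              altStep st (bit, pal, parity)) st) ([], none) := by
    rw [cellsFrom, List.foldl_flatMap]
    congr 1
  show altFlush _ = _
  rw [hfold]

lemma a_eq_map (rb : List Int) :
    render_hgr_row rb
    = (PySem.List.pyRange 0 (((cellsFrom 0 rb).length : Int)) 1).map (pixA (cellsFrom 0 rb)) := by
  have hzeros : List.replicate (((rb.length : Int) * 7).toNat) (0 : Int)
      = [] ++ List.replicate (7 * rb.length) 0 := by
    rw [List.nil_append]
    congr 1
    omega
  have hfill := fill_spec rb rb 0 rfl [] [] rfl rfl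
  simp only [List.nil_append] at hfill
  have hlen : ((rb.length : Int) * 7) = ((cellsFrom 0 rb).length : Int) := by
    rw [cells_length]
    push_cast
    ring
  dsimp only [render_hgr_row]
  rw [hzeros]
  simp only [List.nil_append]
  push_cast at hfill
  rw [hfill, PySem.List.foldl_append_singleton_eq_map, List.nil_append]
  rw [← cells_fst rb 0, ← cells_pal rb 0] at *
  rw [hlen]
  rfl

-- ===== VERDICT (by name: the statement is the Claim_ definition above) =====
theorem render_hgr_row_spec : Claim_equal_render_hgr_row := by
  intro rb _
  unfold Spec_render_hgr_row
  rw [a_eq_map, alt_eq_cells]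
  have hpar : ∀ j : Nat, j < (cellsFrom 0 rb).length →
      ((cellsFrom 0 rb).getD j (0, 0, 0)).2.2 = (j : Int) % 2 := by
    intro j hj
    rw [cells_length] at hj
    have := cells_parity rb 0 j (le_refl 0) hj
    rw [this]
    norm_num
  rcases hC : cellsFrom 0 rb with _ | ⟨c0, rest⟩
  · simp [altFlush, PySem.List.pyRange_one_eq_nil]
  · have hlen1 : 1 ≤ (cellsFrom 0 rb).length := by rw [hC]; simp
    have hfirst : altStep (([], none) :
          List (Int × Int × Int) × Option (Int × Int × Int × Bool)) c0
        = ([], prevOf (cellsFrom 0 rb) 1) := by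
      have hc02 : c0.2.2 = 0 := by
        have := hpar 0 (by omega)
        rw [hC] at this
        simpa using this
      simp only [altStep, prevOf, hC]
      simp [bAt, pAt, hc02]
    have hdrop1 : (cellsFrom 0 rb).drop 1 = rest := by rw [hC]; rfl
    have hstream := stream_spec rest (cellsFrom 0 rb) 1 [] hdrop1 (le_refl 1) hlen1 hpar
    rw [← hC]
    conv_rhs => rw [hC, List.foldl_cons]
    rw [hfirst, hstream]
    norm_num
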